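-- pv_equiv track=rewrite | github.com/zihad-007/Job-Post-Fraud-Detection-System-with-AI- | duplicate_detector.py | _contact_reused
-- ===== SOURCE A (Python) =====
-- from typing import Dict, Iterable, List, Optional, Tuple
--
-- def _contact_reused(new_contacts: Tuple[List[str], List[str]], corp_contacts: List[Tuple[List[str], List[str]]]) -> bool:
--     """Check if any email/phone appears in more than one post."""
--     new_emails, new_phones = set(map(str.lower, new_contacts[0])), set(map(str, new_contacts[1]))
--
--     corpus_emails = set()
--     corpus_phones = set()
--     for emails, phones in corp_contacts:
--         corpus_emails.update(map(str.lower, emails))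
--         corpus_phones.update(map(str, phones))
--
--     reused_email = bool(new_emails & corpus_emails)
--     reused_phone = bool(new_phones & corpus_phones)
--     return reused_email or reused_phone
-- ===== SOURCE B (Python) =====
-- from typing import Dict, Iterable, List, Optional, Tuple
--
-- def _contact_reused(new_contacts: Tuple[List[str], List[str]], corp_contacts: List[Tuple[List[str], List[str]]]) -> bool:
--     """Check if any email/phone appears in more than one post."""
--     # Tag each contact with a type prefix ('E'/'P'), sort the two deduplicated key
--     # lists, and detect a shared key with a two-pointer merge scan.
--     new_keys = sorted({"E" + e.lower() for e in new_contacts[0]} | {"P" + str(p) for p in new_contacts[1]})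
--     corp_keys = sorted({"E" + e.lower() for es, _ps in corp_contacts for e in es}
--                        | {"P" + str(p) for _es, ps in corp_contacts for p in ps})
--     i = j = 0
--     while i < len(new_keys) and j < len(corp_keys):
--         if new_keys[i] == corp_keys[j]:
--             return True
--         if new_keys[i] < corp_keys[j]:
--             i += 1
--         else:
--             j += 1
--     return False
-- ===== Notes on version B (the rewrite author's own statement) =====
-- stated objective: alternative
-- what changed: B replaces A's hash-set accumulate-and-intersect by a sort-and-merge algorithm: it tags every contact with an 'E'/'P' type prefix, sorts the two deduplicated key lists, and detects a shared key with a two-pointer merge scan.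
import Mathlib
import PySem

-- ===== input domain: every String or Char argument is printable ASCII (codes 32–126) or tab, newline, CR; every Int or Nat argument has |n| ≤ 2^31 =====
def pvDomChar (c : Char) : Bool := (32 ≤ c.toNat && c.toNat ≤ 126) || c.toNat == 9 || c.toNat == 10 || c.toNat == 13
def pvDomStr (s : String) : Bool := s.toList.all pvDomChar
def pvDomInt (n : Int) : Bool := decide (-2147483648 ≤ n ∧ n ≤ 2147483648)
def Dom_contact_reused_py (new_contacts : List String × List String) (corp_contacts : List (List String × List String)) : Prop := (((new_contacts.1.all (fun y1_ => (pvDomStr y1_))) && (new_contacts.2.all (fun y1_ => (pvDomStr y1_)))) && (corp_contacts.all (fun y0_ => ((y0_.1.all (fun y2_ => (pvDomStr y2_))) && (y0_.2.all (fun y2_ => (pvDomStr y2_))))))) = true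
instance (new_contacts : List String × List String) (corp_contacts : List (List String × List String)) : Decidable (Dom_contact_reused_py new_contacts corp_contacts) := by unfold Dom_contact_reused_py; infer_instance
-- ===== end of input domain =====

-- B replaces A's hash-set accumulate-and-intersect by a sort-and-merge algorithm
-- (tag contacts with an 'E'/'P' prefix, sort both deduplicated key lists, two-pointer
-- merge scan for a shared key); same result, no speed claim.

-- ===== PORT A =====
-- str(p) on a str is the identity, so 'set(map(str, …))' is ported as Set.ofList of the list itself.
def contact_reused_py (new_contacts : List String × List String) (corp_contacts : List (List String × List String)) : Bool :=
  let new_emails : PySem.Set String := PySem.Set.ofList (new_contacts.1.map PySem.Str.lower)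
  let new_phones : PySem.Set String := PySem.Set.ofList new_contacts.2
  let corpus := corp_contacts.foldl
    (fun (acc : PySem.Set String × PySem.Set String) ep =>
      (PySem.Set.update acc.1 (ep.1.map PySem.Str.lower), PySem.Set.update acc.2 ep.2))
    (PySem.Set.empty, PySem.Set.empty)
  let reused_email := !(PySem.Set.inter new_emails corpus.1).isEmpty   -- bool(s) = s is nonempty
  let reused_phone := !(PySem.Set.inter new_phones corpus.2).isEmpty
  reused_email || reused_phone

-- ===== PORT B =====
-- the two-pointer while loop of Source B, as the obvious structural recursion on the two suffixes
def crMerge : List String → List String → Bool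
  | [], _ => false
  | _ :: _, [] => false
  | a :: as_, b :: bs =>
    if a = b then true
    else if a < b then crMerge as_ (b :: bs)
    else crMerge (a :: as_) bs

def contact_reused_py_alt (new_contacts : List String × List String) (corp_contacts : List (List String × List String)) : Bool :=
  let new_keys := PySem.List.sorted
    (PySem.Set.union (PySem.Set.ofList (new_contacts.1.map (fun e => "E" ++ PySem.Str.lower e)))
      (new_contacts.2.map (fun p => "P" ++ p)))
    (fun x => x) false
  let corp_keys := PySem.List.sorted
    (PySem.Set.union (PySem.Set.ofList (corp_contacts.flatMap (fun ep => ep.1.map (fun e => "E" ++ PySem.Str.lower e))))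
      (corp_contacts.flatMap (fun ep => ep.2.map (fun p => "P" ++ p))))
    (fun x => x) false
  crMerge new_keys corp_keys

-- ===== PRECONDITION & SPEC =====
def Spec_contact_reused_py (new_contacts : List String × List String) (corp_contacts : List (List String × List String)) (out : Bool) : Prop := out = contact_reused_py_alt new_contacts corp_contacts
instance (new_contacts : List String × List String) (corp_contacts : List (List String × List String)) (out : Bool) : Decidable (Spec_contact_reused_py new_contacts corp_contacts out) := by unfold Spec_contact_reused_py; infer_instance

-- ===== CLAIM (what is proved, stated in full; the proofs are below) =====
def Claim_equal_contact_reused_py : Prop := ∀ (new_contacts : List String × List String) (corp_contacts : List (List String × List String)), Dom_contact_reused_py new_contacts corp_contacts → Spec_contact_reused_py new_contacts corp_contacts (contact_reused_py new_contacts corp_contacts)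

-- ===== LEMMAS AND PROOFS =====

-- Membership in the pairwise-accumulated corpus sets, by induction over corp_contacts.
theorem mem_corpus_fold (cc : List (List String × List String))
    (s t : PySem.Set String) (y : String) :
    (y ∈ (cc.foldl (fun (acc : PySem.Set String × PySem.Set String) ep =>
        (PySem.Set.update acc.1 (ep.1.map PySem.Str.lower), PySem.Set.update acc.2 ep.2)) (s, t)).1
      ↔ y ∈ s ∨ ∃ ep ∈ cc, ∃ e ∈ ep.1, y = PySem.Str.lower e) ∧
    (y ∈ (cc.foldl (fun (acc : PySem.Set String × PySem.Set String) ep =>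
        (PySem.Set.update acc.1 (ep.1.map PySem.Str.lower), PySem.Set.update acc.2 ep.2)) (s, t)).2
      ↔ y ∈ t ∨ ∃ ep ∈ cc, y ∈ ep.2) := by
  induction cc generalizing s t with
  | nil => simp
  | cons hd tl ih =>
    simp only [List.foldl_cons]
    constructor
    · rw [(ih _ _).1]
      simp [PySem.Set.mem_update, List.mem_map]
      aesop
    · rw [(ih _ _).2]
      simp [PySem.Set.mem_update]
      aesop

theorem nonempty_iff_exists_mem {α : Type} (l : List α) :
    (!l.isEmpty) = true ↔ ∃ x, x ∈ l := by
  cases l <;> simp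

-- the merge scan detects exactly a shared element of two ≤-sorted lists
theorem crMerge_spec : ∀ (l1 l2 : List String),
    l1.Pairwise (· ≤ ·) → l2.Pairwise (· ≤ ·) →
    (crMerge l1 l2 = true ↔ ∃ x, x ∈ l1 ∧ x ∈ l2) := by
  intro l1
  induction l1 with
  | nil => intro l2 _ _; simp [crMerge]
  | cons a as_ ih1 =>
    intro l2
    induction l2 with
    | nil => intro _ _; simp [crMerge]
    | cons b bs ih2 =>
      intro h1 h2
      by_cases heq : a = b
      · simp only [crMerge, if_pos heq]
        exact ⟨fun _ => ⟨a, by simp, by simp [heq]⟩, fun _ => trivial⟩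
      · by_cases hlt : a < b
        · simp only [crMerge, if_neg heq, if_pos hlt]
          rw [ih1 _ (List.pairwise_cons.mp h1).2 h2]
          constructor
          · rintro ⟨x, hx1, hx2⟩; exact ⟨x, by simp [hx1], hx2⟩
          · rintro ⟨x, hx1, hx2⟩
            rcases List.mem_cons.mp hx1 with rfl | hx1
            · exfalso
              rcases List.mem_cons.mp hx2 with rfl | hx2
              · exact absurd rfl heq
              · exact absurd rfl
                  (ne_of_lt (lt_of_lt_of_le hlt ((List.pairwise_cons.mp h2).1 _ hx2)))
            · exact ⟨x, hx1, hx2⟩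
        · simp only [crMerge, if_neg heq, if_neg hlt]
          rw [ih2 h1 (List.pairwise_cons.mp h2).2]
          constructor
          · rintro ⟨x, hx1, hx2⟩; exact ⟨x, hx1, by simp [hx2]⟩
          · rintro ⟨x, hx1, hx2⟩
            rcases List.mem_cons.mp hx2 with rfl | hx2
            · exfalso
              have hba : x < a := lt_of_le_of_ne (le_of_not_gt hlt) (Ne.symm heq)
              rcases List.mem_cons.mp hx1 with rfl | hx1
              · exact absurd rfl (ne_of_lt hba)
              · exact absurd rfl
                  (ne_of_lt (lt_of_lt_of_le hba ((List.pairwise_cons.mp h1).1 _ hx1)))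
            · exact ⟨x, hx1, hx2⟩

-- tag-prefix facts: 'E'/'P' tagging is injective and the two namespaces are disjoint
theorem tagE_inj (a b : String) : "E" ++ a = "E" ++ b ↔ a = b := by
  constructor
  · intro h
    have := congrArg String.toList h
    simpa using String.toList_injective (by simpa using this)
  · rintro rfl; rfl

theorem tagEP_ne (a b : String) : "E" ++ a ≠ "P" ++ b := by
  intro h
  have := congrArg String.toList h
  simp at this

theorem tagP_inj (a b : String) : "P" ++ a = "P" ++ b ↔ a = b := by
  constructor
  · intro h
    have := congrArg String.toList h
    simpa using String.toList_injective (by simpa using this)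
  · rintro rfl; rfl

theorem contact_reused_py_spec : Claim_equal_contact_reused_py := by
  intro nc cc _
  show contact_reused_py nc cc = contact_reused_py_alt nc cc
  unfold contact_reused_py contact_reused_py_alt
  simp only []
  rw [Bool.eq_iff_iff]
  rw [Bool.or_eq_true, nonempty_iff_exists_mem, nonempty_iff_exists_mem]
  rw [crMerge_spec _ _ (PySem.List.sorted_pairwise _ _) (PySem.List.sorted_pairwise _ _)]
  -- reduce both sides to the same "shared lowered email or shared phone" statement
  constructor
  · rintro (⟨x, hx⟩ | ⟨x, hx⟩)
    · rw [PySem.Set.mem_inter] at hx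
      obtain ⟨hnew, hcorp⟩ := hx
      rw [(mem_corpus_fold cc _ _ x).1] at hcorp
      rcases hcorp with h | ⟨ep, hep, e, he, rfl⟩
      · simp [PySem.Set.empty] at h
      · rw [PySem.Set.mem_ofList, List.mem_map] at hnew
        obtain ⟨e1, he1, hlo⟩ := hnew
        refine ⟨"E" ++ PySem.Str.lower e, ?_, ?_⟩ <;>
          rw [PySem.List.mem_sorted, PySem.Set.mem_union]
        · exact Or.inl (by rw [PySem.Set.mem_ofList, List.mem_map]; exact ⟨e1, he1, by rw [hlo]⟩)
        · exact Or.inl (by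
            rw [PySem.Set.mem_ofList, List.mem_flatMap]
            exact ⟨ep, hep, by rw [List.mem_map]; exact ⟨e, he, rfl⟩⟩)
    · rw [PySem.Set.mem_inter] at hx
      obtain ⟨hnew, hcorp⟩ := hx
      rw [(mem_corpus_fold cc _ _ x).2] at hcorp
      rcases hcorp with h | ⟨ep, hep, hp⟩
      · simp [PySem.Set.empty] at h
      · rw [PySem.Set.mem_ofList] at hnew
        refine ⟨"P" ++ x, ?_, ?_⟩ <;> rw [PySem.List.mem_sorted, PySem.Set.mem_union]
        · exact Or.inr (by rw [List.mem_map]; exact ⟨x, hnew, rfl⟩)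
        · exact Or.inr (by
            rw [List.mem_flatMap]
            exact ⟨ep, hep, by rw [List.mem_map]; exact ⟨x, hp, rfl⟩⟩)
  · rintro ⟨k, hk1, hk2⟩
    rw [PySem.List.mem_sorted, PySem.Set.mem_union] at hk1 hk2
    rcases hk1 with h1 | h1 <;> rcases hk2 with h2 | h2
    · -- shared email
      rw [PySem.Set.mem_ofList, List.mem_map] at h1
      rw [PySem.Set.mem_ofList, List.mem_flatMap] at h2
      obtain ⟨e1, he1, hk⟩ := h1
      obtain ⟨ep, hep, h2⟩ := h2
      rw [List.mem_map] at h2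
      obtain ⟨e2, he2, hk'⟩ := h2
      have hEq : PySem.Str.lower e1 = PySem.Str.lower e2 := by
        rw [← tagE_inj, hk, hk']
      refine Or.inl ⟨PySem.Str.lower e1, ?_⟩
      rw [PySem.Set.mem_inter]
      refine ⟨by rw [PySem.Set.mem_ofList, List.mem_map]; exact ⟨e1, he1, rfl⟩, ?_⟩
      rw [(mem_corpus_fold cc _ _ _).1]
      exact Or.inr ⟨ep, hep, e2, he2, hEq⟩
    · -- email tag meets phone tag: impossible
      rw [PySem.Set.mem_ofList, List.mem_map] at h1
      rw [List.mem_flatMap] at h2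
      obtain ⟨e1, _, hk⟩ := h1
      obtain ⟨ep, _, h2⟩ := h2
      rw [List.mem_map] at h2
      obtain ⟨p2, _, hk'⟩ := h2
      exact absurd (hk.trans hk'.symm) (tagEP_ne _ _)
    · rw [List.mem_map] at h1
      rw [PySem.Set.mem_ofList, List.mem_flatMap] at h2
      obtain ⟨p1, _, hk⟩ := h1
      obtain ⟨ep, _, h2⟩ := h2
      rw [List.mem_map] at h2
      obtain ⟨e2, _, hk'⟩ := h2
      exact absurd (hk'.trans hk.symm) (tagEP_ne _ _)
    · -- shared phone
      rw [List.mem_map] at h1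
      rw [List.mem_flatMap] at h2
      obtain ⟨p1, hp1, hk⟩ := h1
      obtain ⟨ep, hep, h2⟩ := h2
      rw [List.mem_map] at h2
      obtain ⟨p2, hp2, hk'⟩ := h2
      have hEq : p1 = p2 := by rw [← tagP_inj, hk, hk']
      refine Or.inr ⟨p1, ?_⟩
      rw [PySem.Set.mem_inter]
      refine ⟨by rw [PySem.Set.mem_ofList]; exact hp1, ?_⟩
      rw [(mem_corpus_fold cc _ _ _).2]
      exact Or.inr ⟨ep, hep, hEq ▸ hp2⟩
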